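-- pv_equiv track=rewrite | github.com/A6y55/Differential-Privacy-Algorithm | rappor_lasso2.py | hash14
-- ===== SOURCE A (Python) =====
-- def hash14(num):
--     temp = [0] * 4
--     num = num * num
--     if num < 26:
--         return num + 9
--     for i in range(4):
--         k = num % 10
--         temp[i] = k
--         num = num // 17
--     return temp[2] * 10 + temp[1]
-- ===== SOURCE B (Python) =====
-- # The returned value depends only on s % 2890 (s = num*num), since
-- # (s//289)%10 is determined by s mod 2890 and (s//17)%10 by s mod 170.
-- # So precompute a 2890-entry lookup table once and answer by one modulo.
-- _TABLE = [(r // 289) * 10 + (r % 170) // 17 for r in range(2890)]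
--
--
-- def hash14(num):
--     s = num * num
--     if s < 26:
--         return s + 9
--     return _TABLE[s % 2890]
-- ===== Notes on version B (the rewrite author's own statement) =====
-- stated objective: alternative
-- what changed: Replaced the digit-extraction loop over a temp list with a precomputed 2890-entry lookup table indexed by s % 2890, exploiting that the result is periodic in s with period 2890.
import Mathlib
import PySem

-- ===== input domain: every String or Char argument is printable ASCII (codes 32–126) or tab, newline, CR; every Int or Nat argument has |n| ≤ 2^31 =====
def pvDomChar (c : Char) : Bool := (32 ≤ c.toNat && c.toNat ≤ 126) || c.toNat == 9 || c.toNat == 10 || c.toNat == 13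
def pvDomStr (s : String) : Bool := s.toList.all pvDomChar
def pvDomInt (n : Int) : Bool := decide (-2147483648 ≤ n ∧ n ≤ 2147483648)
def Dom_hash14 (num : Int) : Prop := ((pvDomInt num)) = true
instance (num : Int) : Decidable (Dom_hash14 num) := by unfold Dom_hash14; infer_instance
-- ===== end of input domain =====

-- B replaces A's digit-extraction loop with a precomputed lookup table indexed by s % 2890
-- (the result is periodic in s = num*num with period 2890); alternative, not claimed faster.

-- ===== PORT A =====
def hash14 (num : Int) : Int :=
  let temp : List Int := List.replicate 4 0
  let num := num * num
  if num < 26 then num + 9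
  else
    let st := (PySem.List.pyRange 0 4 1).foldl
      (fun (st : List Int × Int) i =>
        let k := PySem.Int.mod st.2 10
        (st.1.set i.toNat k, PySem.Int.floordiv st.2 17)) (temp, num)
    -- temp[2], temp[1]: indices always in range of the length-4 list, so pyGet? is some
    (PySem.List.pyGet? st.1 2).getD 0 * 10 + (PySem.List.pyGet? st.1 1).getD 0

-- ===== PORT B =====
-- the module-level table _TABLE = [(r // 289) * 10 + (r % 170) // 17 for r in range(2890)]
def hash14Table : List Int :=
  (PySem.List.pyRange 0 2890 1).map
    (fun r => PySem.Int.floordiv r 289 * 10 + PySem.Int.floordiv (PySem.Int.mod r 170) 17)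

def hash14_alt (num : Int) : Int :=
  let s := num * num
  if s < 26 then s + 9
  else
    -- _TABLE[s % 2890]: 0 ≤ s % 2890 < 2890 = len(_TABLE), so pyGet? is always some
    (PySem.List.pyGet? hash14Table (PySem.Int.mod s 2890)).getD 0

-- ===== PRECONDITION & SPEC =====
def Spec_hash14 (num : Int) (out : Int) : Prop := out = hash14_alt num
instance (num : Int) (out : Int) : Decidable (Spec_hash14 num out) := by unfold Spec_hash14; infer_instance

-- ===== CLAIM (what is proved, stated in full; the proofs are below) =====
def Claim_equal_hash14 : Prop := ∀ (num : Int), Dom_hash14 num → Spec_hash14 num (hash14 num)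

-- ===== LEMMAS AND PROOFS =====

-- looking up the table at an in-range index gives its generating formula (in ediv/emod terms)
theorem hash14_table_get (i : Int) (h0 : 0 ≤ i) (h1 : i < 2890) :
    (PySem.List.pyGet? hash14Table i).getD 0 = i / 289 * 10 + i % 170 / 17 := by
  obtain ⟨n, rfl⟩ : ∃ n : Nat, i = (n : Int) := ⟨i.toNat, (Int.toNat_of_nonneg h0).symm⟩
  have hn : n < 2890 := by exact_mod_cast h1
  rw [PySem.List.pyGet?_natCast]
  unfold hash14Table PySem.List.pyRange
  simp [hn, PySem.Int.floordiv, PySem.Int.mod,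
    Int.fdiv_eq_ediv, Int.fmod_eq_emod]

-- ===== VERDICT (by name: the statement is the Claim_ definition above) =====
theorem hash14_spec : Claim_equal_hash14 := by
  intro num _
  unfold Spec_hash14 hash14 hash14_alt
  by_cases h : num * num < 26
  · simp [h]
  · have hs : (0:Int) ≤ num * num := mul_self_nonneg num
    simp only [h, if_false]
    have hmod : PySem.Int.mod (num * num) 2890 = num * num % 2890 := by
      simp [PySem.Int.mod, Int.fmod_eq_emod]
    rw [hmod, hash14_table_get _ (Int.emod_nonneg _ (by norm_num)) (Int.emod_lt_of_pos _ (by norm_num))]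
    simp [PySem.List.pyRange, List.range_succ, PySem.List.pyGet?,
      PySem.List.pyIdx?, List.set, PySem.Int.floordiv, PySem.Int.mod,
      Int.fdiv_eq_ediv, Int.fmod_eq_emod]
    omega
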